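/-
  jsmn_s.bin (-DJSMN_STRICT -DJSMN_PARENT_LINKS): `jsmn_parse` (901 bytes at 1002A9H, 248 instructions, 3 loops) — THE CUT POINTS AND THE STATE
  PREDICATES AT THEM, and the statement of every region as a `Prop`, so that every region is proved on its own (Prog/Jsmn/S/Parse*.lean) and they are composed
  in Prog/Jsmn/S/Parse.lean. It mirrors Prog/Jsmn/D/ParseInv.lean; the model is the same function with `cfg = Config.strictLinks`.

  REGISTERS after the prologue (1002A9H – 1002CCH: six pushes, sub rsp 8):  rbp = parser, r15 = js, r14 = len, r13 = tokens, r12d = count,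
  [rsp+4] = num_tokens (32 bits); rsp = sp0 - 38H where sp0 = rsp on entry; the six saved registers at sp0-8 … sp0-30H (r15 r14 r13 r12 rbp rbx).
  In the loop: esi = pos as loaded at the loop head (used again by the closing bracket: `add esi, 1 ; mov [rdx+8], esi`); ebx = the current character
  (zero-extended byte) ONLY on the way to the entries reached by the compare chain (`{ [ } ]`, and `t f n`); on the way through the jump table
  ebx is the character minus 9 (`sub ebx, 9 ; movzx ebx, bl ; jmp [rbx*8 + 100700H]`).

  CUT POINTS
    10048FH  LOOP HEAD   `MainInv`: Frame for a model state `s` + "the model's loop from `s` with `k` units of fuel gives the final result"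
    100587H  the loop test failed                              `AtFinal`     → FinalSpec → AtRet
    the entry of each `case`                                   `AtCase`      → the case's Spec → Outcome of `Jsmn.body`
        10033FH `{ [`    1003B7H `} ]`    100438H `"`    1004D2H `,`    10047DH `:`    1004FEH a primitive's first character (- 0…9 t f n)
        100486H white space (= the `pos++` landing: nothing to do)
        `default: return JSMN_ERROR_INVAL`: five two-instruction landings (1002D1H, 100337H, 10031FH, 1005C6H, 1005D1H: `mov r12d, -2 ; jmp 100325`);
        the loop-head region walks them itself and ends in `AtRet` (see `HeadSpec`), so there is no `case` entry for them.
    100486H  `parser->pos++` (every `break` lands here)        `AtNext`      → NextSpec → the loop head with pos + 1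
    100325H  `return r` (r in r12d; every `return` lands here) `AtRet`       → EpilogueSpec → ScanPost
  Every case region is stated against the model's `Jsmn.body … s ch` for the dispatched character: it must reach `AtNext s'` if the body says
  `.next s'` and `AtRet r s'` if it says `.ret r s'`.
-/
import Prog.Jsmn.State
import Prog.Jsmn.CodeS
import X86.Derived.Prog.MemWords
import X86.Derived.Prog.Reach

namespace X86
namespace J6
namespace S
open X86.User (CodeAt RegsKept Span FlagsOK Layout toNat_add_ofNat toNat_ofNat_lt' add_ofNat_add)
open Jsmn

set_option linter.unusedVariables false

/-- The constants of one call of jsmn_parse. -/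
structure PCtx where
  ret : Word
  pa : Word
  jsA : Word
  tb : Word
  js : List UInt8
  numTokens : Nat
  /-- the parser state and the tokens argument on entry -/
  p0 : Parser
  toks0 : Option Tokens

/-- The number of bytes of the token array (20 bytes a token; 0 in counting mode). -/
def PCtx.tlen (c : PCtx) : Nat := toksBytes Config.strictLinks c.numTokens c.toks0

/-- What jsmn_parse was called with (the hypotheses of `ParseSpec`, bundled). -/
structure Entry (c : PCtx) (n : User.Layout) (v0 : User.State) : Prop where
  pre : ScanPre binS n binS.parse binS.useParse v0 c.ret c.pa c.jsA c.tb c.js c.numTokens c.p0 c.toks0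
  r8 : Word.low .w32 (v0.reg .r8) = UInt64.ofNat c.numTokens
  inv : Inv Config.strictLinks c.p0 c.toks0 c.numTokens

/-- What holds at every cut point inside the loop, apart from RIP, the count register and the model's invariant: the registers that hold the
arguments, the stack frame (saved registers, num_tokens, return address), what memory may have changed, and the parser / tokens = the model's. -/
structure FrameCore (c : PCtx) (n : User.Layout) (v0 v : User.State) (p : Parser) (toks : Option Tokens) : Prop where
  entry : Entry c n v0
  rsp : v.reg .rsp = v0.reg .rsp - 0x38
  rbp : v.reg .rbp = c.pa
  r15 : v.reg .r15 = c.jsA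
  r14 : v.reg .r14 = UInt64.ofNat c.js.length
  r13 : v.reg .r13 = c.tb
  ntok : v.mem.readLE (v0.reg .rsp - 0x34) 4 = c.numTokens
  sv15 : v.mem.readLE (v0.reg .rsp - 0x8) 8 = (v0.reg .r15).toNat
  sv14 : v.mem.readLE (v0.reg .rsp - 0x10) 8 = (v0.reg .r14).toNat
  sv13 : v.mem.readLE (v0.reg .rsp - 0x18) 8 = (v0.reg .r13).toNat
  sv12 : v.mem.readLE (v0.reg .rsp - 0x20) 8 = (v0.reg .r12).toNat
  svbp : v.mem.readLE (v0.reg .rsp - 0x28) 8 = (v0.reg .rbp).toNat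
  svbx : v.mem.readLE (v0.reg .rsp - 0x30) 8 = (v0.reg .rbx).toNat
  retA : UInt64.ofNat (v.mem.readLE (v0.reg .rsp) 8) = c.ret
  same : SameOutside v0.mem v.mem (((v0.reg .rsp).toNat - 96, (v0.reg .rsp).toNat) :: dataWins c.pa c.tb c.tlen)
  parser : ParserAt v.mem c.pa p
  toksArg : ToksArg Config.strictLinks v.mem c.tb c.numTokens toks
  null : toks = none ↔ c.toks0 = none

/-- `FrameCore` + the count in r12d + the model's invariant: what holds for the model state `s` at the loop head, at a `case`, at `pos++`. -/
structure Frame (c : PCtx) (n : User.Layout) (v0 v : User.State) (s : St) : Prop where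
  core : FrameCore c n v0 v s.p s.toks
  r12 : v.reg .r12 = UInt64.ofNat (u32 s.count)
  cnt : -2147483648 ≤ s.count ∧ s.count < 2147483648
  inv : Inv Config.strictLinks s.p s.toks c.numTokens

/-- The loop head (10048FH): the model's loop, run from `s` with `k` units of fuel, gives `res`. -/
def MainInv (c : PCtx) (n : User.Layout) (v0 : User.State) (res : Int × St) (k : Nat) (v : User.State) : Prop :=
  v.rip = 0x10048f ∧ ∃ s, Frame c n v0 v s ∧ loop Config.strictLinks c.js c.numTokens k s = some res

/-- The loop test has failed (100587H). -/
def AtFinal (c : PCtx) (n : User.Layout) (v0 v : User.State) (s : St) : Prop := v.rip = 0x100587 ∧ Frame c n v0 v s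

/-- At the entry `addr` of a `case`. What a case may rely on besides `Frame`:
  * at the two bracket entries (10033FH `{ [`, 1003B7H `} ]`: both test `bl` again) the character is in ebx, zero-extended — at the entries reached
    through the jump table ebx is the character minus 9, so nothing is said there;
  * at the closing-bracket entry (1003B7H, the only one that uses it) esi still holds pos as loaded at the loop head. -/
structure AtCase (c : PCtx) (n : User.Layout) (v0 v : User.State) (s : St) (addr : Word) (ch : UInt8) : Prop where
  rip : v.rip = addr
  frame : Frame c n v0 v s
  rbx : addr = 0x10033f ∨ addr = 0x1003b7 → v.reg .rbx = ch.toUInt64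
  rsi : addr = 0x1003b7 → v.reg .rsi = UInt64.ofNat s.p.pos
  more : more c.js s.p.pos = true
  ch : ch = charAt c.js s.p.pos

/-- About to do `parser->pos++` (100486H). -/
def AtNext (c : PCtx) (n : User.Layout) (v0 v : User.State) (s : St) : Prop := v.rip = 0x100486 ∧ Frame c n v0 v s

/-- About to return `r` (100325H: `mov eax, r12d`, the epilogue). -/
def AtRet (c : PCtx) (n : User.Layout) (v0 v : User.State) (r : Int) (s : St) : Prop :=
  v.rip = 0x100325 ∧ FrameCore c n v0 v s.p s.toks ∧ Word.low .w32 (v.reg .r12) = UInt64.ofNat (u32 r)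

/-- Where a case region must end, given what the model's loop body says. -/
def Outcome (c : PCtx) (n : User.Layout) (v0 v : User.State) : Option Step → Prop
  | some (.next s') => AtNext c n v0 v s'
  | some (.ret r s') => AtRet c n v0 v r s'
  | none => False

/-- The characters of strict mode's `default: return JSMN_ERROR_INVAL`: everything that is not a bracket, a quote, white space, `:`, `,` or the first
character of a primitive (`-`, a digit, `t`, `f`, `n`). -/
def InvalChar (ch : UInt8) : Prop :=
  ch ≠ 0x7b ∧ ch ≠ 0x5b ∧ ch ≠ 0x7d ∧ ch ≠ 0x5d ∧ ch ≠ 0x22 ∧ ch ≠ 0x09 ∧ ch ≠ 0x0d ∧ ch ≠ 0x0a ∧ ch ≠ 0x20 ∧ ch ≠ 0x3a ∧ ch ≠ 0x2c ∧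
    primStart ch = false

/-- Which `case` entry the loop head (compare chain + jump table) reaches for the character `ch` (the characters of `InvalChar` reach no entry). -/
def Dispatch (ch : UInt8) (addr : Word) : Prop :=
  (ch = 0x3a ∧ addr = 0x10047d) ∨ (ch = 0x22 ∧ addr = 0x100438) ∨ ((ch = 0x7b ∨ ch = 0x5b) ∧ addr = 0x10033f) ∨
  ((ch = 0x7d ∨ ch = 0x5d) ∧ addr = 0x1003b7) ∨ (ch = 0x2c ∧ addr = 0x1004d2) ∨
  ((ch = 0x09 ∨ ch = 0x0d ∨ ch = 0x0a ∨ ch = 0x20) ∧ addr = 0x100486) ∨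
  (primStart ch = true ∧ addr = 0x1004fe)

/-! ### The regions, as Props -/

/-- 1002A9H → 10048FH: the prologue. -/
def EntrySpec (n : User.Layout) : Prop :=
  ∀ c v0, Entry c n v0 → Reach n v0 (fun v => v.rip = 0x10048f ∧ Frame c n v0 v ⟨c.p0, c.toks0, i32 c.p0.toknext⟩)

/-- 10048FH → 100587H (the test fails), or the entry of the `case` of the current character (white space: straight to `pos++`), or — for a character
of `default:` — `return JSMN_ERROR_INVAL` (100325H with -2 in r12d). -/
def HeadSpec (n : User.Layout) : Prop :=
  ∀ c v0 v s, v.rip = 0x10048f → Frame c n v0 v s →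
    Reach n v (fun v' => (more c.js s.p.pos = false ∧ AtFinal c n v0 v' s) ∨
      (∃ addr, Dispatch (charAt c.js s.p.pos) addr ∧ AtCase c n v0 v' s addr (charAt c.js s.p.pos)) ∨
      (more c.js s.p.pos = true ∧ InvalChar (charAt c.js s.p.pos) ∧ AtRet c n v0 v' JSMN_ERROR_INVAL s))

/-- A `case` of the switch, entered at `addr` for the characters `ok`: it does what `Jsmn.body` says. `fuel` is what the model hands to the scans. -/
def CaseSpec (n : User.Layout) (addr : Word) (ok : UInt8 → Prop) : Prop :=
  ∀ c v0 v s ch fuel, ok ch → AtCase c n v0 v s addr ch →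
    body Config.strictLinks c.js fuel c.numTokens s ch ≠ none →
    Reach n v (fun v' => Outcome c n v0 v' (body Config.strictLinks c.js fuel c.numTokens s ch))

def ColonSpec (n : User.Layout) : Prop := CaseSpec n 0x10047d (fun ch => ch = 0x3a)
def StringSpec (n : User.Layout) : Prop := CaseSpec n 0x100438 (fun ch => ch = 0x22)
def OpenSpec (n : User.Layout) : Prop := CaseSpec n 0x10033f (fun ch => ch = 0x7b ∨ ch = 0x5b)
def CloseSpec (n : User.Layout) : Prop := CaseSpec n 0x1003b7 (fun ch => ch = 0x7d ∨ ch = 0x5d)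
def CommaSpec (n : User.Layout) : Prop := CaseSpec n 0x1004d2 (fun ch => ch = 0x2c)
/-- 1004FEH: the strict-mode check of the enclosing token (`forbidden` in `Jsmn.body`), then the call of jsmn_parse_primitive. -/
def PrimitiveSpec (n : User.Layout) : Prop := CaseSpec n 0x1004fe (fun ch => primStart ch = true)

/-- 100486H → 10048FH: `parser->pos++`. -/
def NextSpec (n : User.Layout) : Prop :=
  ∀ c v0 v s, AtNext c n v0 v s →
    Reach n v (fun v' => v'.rip = 0x10048f ∧ Frame c n v0 v' { s with p := { s.p with pos := u32 (s.p.pos + 1) } })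

/-- 100587H → 100325H: the scan for an unclosed object or array after the loop (`Jsmn.finish`). -/
def FinalSpec (n : User.Layout) : Prop :=
  ∀ c v0 v s, AtFinal c n v0 v s → Reach n v (fun v' => AtRet c n v0 v' (finish s) s)

/-- 100325H → the caller: `mov eax, r12d`, `add rsp, 8`, the six pops, `ret`. -/
def EpilogueSpec (n : User.Layout) : Prop :=
  ∀ c v0 v r s, AtRet c n v0 v r s →
    Reach n v (ScanPost binS binS.useParse v0 c.ret c.pa c.tb c.numTokens c.toks0 r s.p s.toks)

end S
end J6
end X86
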